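-- pv_equiv track=rewrite | github.com/HalaAli198/MEM-SBOM | Linux Plugins/module_extractor.py | _collect_descendants
-- ===== SOURCE A (Python) =====
-- def _collect_descendants(root_pid, tasks_by_pid, children_map):
--     """BFS from root_pid, returns all descendant tasks including root."""
--     result = []
--     queue = [root_pid]
--     visited = set()
--
--     while queue:
--         pid = queue.pop(0)
--         if pid in visited:
--             continue
--         visited.add(pid)
--
--         task = tasks_by_pid.get(pid)
--         if task:
--             result.append(task)
--
--         for child_pid in sorted(children_map.get(pid, set())):
--             if child_pid not in visited:
--                 queue.append(child_pid)
--
--     return result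
-- ===== SOURCE B (Python) =====
-- def _collect_descendants(root_pid, tasks_by_pid, children_map):
--     """Two-phase layered traversal: recursively compute the pid visitation order by
--     layers (dedup each layer against an immutable visited set; no enqueue-time
--     filtering -- duplicates are removed when a layer is deduplicated), then map the
--     pid order to tasks in a separate pass."""
--     def layers(level, visited):
--         if not level:
--             return []
--         newly = []
--         for pid in level:
--             if pid not in visited:
--                 visited = visited | {pid}
--                 newly.append(pid)
--         nxt = [c for pid in newly for c in sorted(children_map.get(pid, set()))]
--         return newly + layers(nxt, visited)
--
--     result = []
--     for pid in layers([root_pid], set()):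
--         task = tasks_by_pid.get(pid)
--         if task:
--             result.append(task)
--     return result
-- ===== Notes on version B (the rewrite author's own statement) =====
-- stated objective: alternative
-- what changed: Replaces A's single mutable FIFO queue (pop(0) with enqueue-time visited filtering) by a two-phase algorithm: a recursive layered traversal that first computes the pid visitation order (each layer deduplicated against an immutable visited set, children appended unfiltered since duplicates are dropped at layer dedup), followed by a separate pass mapping pids to their tasks.
import Mathlib
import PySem

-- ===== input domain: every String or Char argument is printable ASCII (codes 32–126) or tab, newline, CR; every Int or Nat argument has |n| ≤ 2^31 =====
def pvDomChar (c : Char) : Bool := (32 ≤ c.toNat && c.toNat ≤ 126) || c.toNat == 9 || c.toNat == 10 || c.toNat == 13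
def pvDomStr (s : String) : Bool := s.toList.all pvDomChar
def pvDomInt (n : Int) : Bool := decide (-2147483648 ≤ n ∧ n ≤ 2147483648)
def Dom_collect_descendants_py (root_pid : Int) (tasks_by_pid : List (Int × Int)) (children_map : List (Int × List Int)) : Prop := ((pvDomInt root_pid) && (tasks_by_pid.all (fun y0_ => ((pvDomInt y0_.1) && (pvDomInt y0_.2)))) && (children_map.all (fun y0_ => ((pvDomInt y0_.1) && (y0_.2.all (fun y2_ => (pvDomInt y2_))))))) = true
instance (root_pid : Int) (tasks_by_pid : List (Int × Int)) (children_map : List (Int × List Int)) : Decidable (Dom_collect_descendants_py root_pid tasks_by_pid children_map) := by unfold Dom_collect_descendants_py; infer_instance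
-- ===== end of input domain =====

-- B replaces A's single mutable FIFO queue (pop(0), enqueue-time visited filter) by a
-- two-phase algorithm: a recursive layered traversal computing the pid order (each layer
-- deduplicated against an immutable visited set, children NOT filtered on enqueue), then a
-- separate pass mapping pids to tasks; return value proved identical (objective: alternative).

-- ===== PORT A =====
-- A's while-queue loop; the Nat argument is a fuel bound (decremented only when a new pid
-- is processed; 2 + total length of all children lists always exceeds that count).
def pvALoop (tb : PySem.Dict Int Int) (cm : PySem.Dict Int (List Int)) :
    Nat → List Int → PySem.Set Int → List Int → List Int
  | _, [], _, r => r
  | n, pid :: q, v, r =>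
    if PySem.Set.contains v pid then pvALoop tb cm n q v r
    else match n with
      | 0 => r  -- fuel exhausted (unreachable for the fuel used below)
      | m + 1 =>
        let v' := PySem.Set.add v pid
        let r' := match tb.get? pid with
          | some t => if t ≠ 0 then r ++ [t] else r   -- `if task:` — falsy for None and 0
          | none => r
        let kids := (PySem.List.sorted (cm.getD pid []) (fun x => x) false).filter
          (fun c => !PySem.Set.contains v' c)
        pvALoop tb cm m (q ++ kids) v' r'
  termination_by n q _ _ => (n, q.length)

def collect_descendants_py (root_pid : Int) (tasks_by_pid : List (Int × Int)) (children_map : List (Int × List Int)) : List Int :=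
  pvALoop (PySem.Dict.mk tasks_by_pid) (PySem.Dict.mk children_map)
    (2 + (children_map.map (fun p => p.2.length)).sum) [root_pid] PySem.Set.empty []

-- ===== PORT B =====
-- `sorted(children_map.get(pid, set()))` of Source B's layer expansion
def pvKids (cm : PySem.Dict Int (List Int)) (pid : Int) : List Int :=
  PySem.List.sorted (cm.getD pid []) (fun x => x) false

-- Source B's inner for-loop of `layers`: dedup one layer against visited (`visited = visited | {pid}`)
def pvBNewly : List Int → PySem.Set Int → List Int × PySem.Set Int
  | [], v => ([], v)
  | pid :: rest, v =>
    if PySem.Set.contains v pid then pvBNewly rest v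
    else
      let p := pvBNewly rest (PySem.Set.add v pid)
      (pid :: p.1, p.2)

-- Source B's recursive `layers`; fuel decremented once per recursive call (one per layer)
def pvBLayers (cm : PySem.Dict Int (List Int)) : Nat → List Int → PySem.Set Int → List Int
  | _, [], _ => []
  | 0, _ :: _, _ => []  -- fuel exhausted (unreachable for the fuel used below)
  | n + 1, level, v =>
    let p := pvBNewly level v
    p.1 ++ pvBLayers cm n (p.1.flatMap (pvKids cm)) p.2

-- Source B's final for-loop mapping the pid order to tasks
def pvBTasks (tb : PySem.Dict Int Int) : List Int → List Int → List Int
  | [], r => r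
  | pid :: rest, r =>
    pvBTasks tb rest (match tb.get? pid with
      | some t => if t ≠ 0 then r ++ [t] else r
      | none => r)

def collect_descendants_py_alt (root_pid : Int) (tasks_by_pid : List (Int × Int)) (children_map : List (Int × List Int)) : List Int :=
  pvBTasks (PySem.Dict.mk tasks_by_pid)
    (pvBLayers (PySem.Dict.mk children_map)
      (2 + (children_map.map (fun p => p.2.length)).sum) [root_pid] PySem.Set.empty) []

-- ===== PRECONDITION & SPEC =====
def Spec_collect_descendants_py (root_pid : Int) (tasks_by_pid : List (Int × Int)) (children_map : List (Int × List Int)) (out : List Int) : Prop := out = collect_descendants_py_alt root_pid tasks_by_pid children_map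
instance (root_pid : Int) (tasks_by_pid : List (Int × Int)) (children_map : List (Int × List Int)) (out : List Int) : Decidable (Spec_collect_descendants_py root_pid tasks_by_pid children_map out) := by unfold Spec_collect_descendants_py; infer_instance

-- ===== CLAIM (what is proved, stated in full; the proofs are below) =====
def Claim_equal_collect_descendants_py : Prop := ∀ (root_pid : Int) (tasks_by_pid : List (Int × Int)) (children_map : List (Int × List Int)), Dom_collect_descendants_py root_pid tasks_by_pid children_map → Spec_collect_descendants_py root_pid tasks_by_pid children_map (collect_descendants_py root_pid tasks_by_pid children_map)

-- ===== LEMMAS AND PROOFS =====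

-- Set facts
lemma pvContainsAddOf (v : PySem.Set Int) (p x : Int) (h : PySem.Set.contains v x = true) :
    PySem.Set.contains (PySem.Set.add v p) x = true := by
  unfold PySem.Set.add; split
  · exact h
  · simp [PySem.Set.contains] at h ⊢; exact Or.inl h

lemma pvContainsAddSelf (v : PySem.Set Int) (p : Int) :
    PySem.Set.contains (PySem.Set.add v p) p = true := by
  unfold PySem.Set.add; split
  · assumption
  · simp [PySem.Set.contains]

lemma pvContainsAddNe (v : PySem.Set Int) (p x : Int) (h : x ≠ p) :
    PySem.Set.contains (PySem.Set.add v p) x = PySem.Set.contains v x := by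
  unfold PySem.Set.add; split
  · rfl
  · simp [PySem.Set.contains, h]

-- the accumulator update shared by A's loop body and Source B's task loop body
def pvAcc (tb : PySem.Dict Int Int) (pid : Int) (r : List Int) : List Int :=
  match tb.get? pid with
  | some t => if t ≠ 0 then r ++ [t] else r
  | none => r

-- unfolding equations for the ports
lemma pvALoop_nil (tb cm) (n : Nat) (v : PySem.Set Int) (r : List Int) :
    pvALoop tb cm n [] v r = r := by
  rw [pvALoop.eq_def]

lemma pvALoop_skip (tb cm) (n : Nat) (pid : Int) (q) (v : PySem.Set Int) (r : List Int)
    (hx : PySem.Set.contains v pid = true) :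
    pvALoop tb cm n (pid :: q) v r = pvALoop tb cm n q v r := by
  rw [pvALoop.eq_def]; simp only []; rw [if_pos hx]

lemma pvALoop_zero (tb cm) (pid : Int) (q) (v : PySem.Set Int) (r : List Int)
    (hx : ¬ PySem.Set.contains v pid = true) :
    pvALoop tb cm 0 (pid :: q) v r = r := by
  rw [pvALoop.eq_def]; simp only []; rw [if_neg hx]

lemma pvALoop_step (tb cm) (m : Nat) (pid : Int) (q) (v : PySem.Set Int) (r : List Int)
    (hx : ¬ PySem.Set.contains v pid = true) :
    pvALoop tb cm (m + 1) (pid :: q) v r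
      = pvALoop tb cm m
          (q ++ (pvKids cm pid).filter (fun c => !PySem.Set.contains (PySem.Set.add v pid) c))
          (PySem.Set.add v pid) (pvAcc tb pid r) := by
  rw [pvALoop.eq_def]; simp only []; rw [if_neg hx]; rfl

lemma pvBNewly_nil (v : PySem.Set Int) : pvBNewly [] v = ([], v) := rfl

lemma pvBNewly_skip (pid : Int) (rest) (v : PySem.Set Int)
    (hx : PySem.Set.contains v pid = true) :
    pvBNewly (pid :: rest) v = pvBNewly rest v := by
  rw [pvBNewly]; rw [if_pos hx]

lemma pvBNewly_step (pid : Int) (rest) (v : PySem.Set Int)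
    (hx : ¬ PySem.Set.contains v pid = true) :
    pvBNewly (pid :: rest) v
      = (pid :: (pvBNewly rest (PySem.Set.add v pid)).1,
          (pvBNewly rest (PySem.Set.add v pid)).2) := by
  rw [pvBNewly]; rw [if_neg hx]

lemma pvBLayers_nil (cm) (n : Nat) (v : PySem.Set Int) : pvBLayers cm n [] v = [] := by
  rw [pvBLayers.eq_def]

lemma pvBLayers_step (cm) (n : Nat) (p : Int) (rest) (v : PySem.Set Int) :
    pvBLayers cm (n + 1) (p :: rest) v
      = (pvBNewly (p :: rest) v).1
        ++ pvBLayers cm n ((pvBNewly (p :: rest) v).1.flatMap (pvKids cm))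
            (pvBNewly (p :: rest) v).2 := by
  rw [pvBLayers.eq_def]

lemma pvBTasks_nil (tb) (r : List Int) : pvBTasks tb [] r = r := rfl

lemma pvBTasks_cons (tb) (pid : Int) (o r : List Int) :
    pvBTasks tb (pid :: o) r = pvBTasks tb o (pvAcc tb pid r) := rfl

-- ===== the reference pid-order function (proof-side only): A's queue recursion with
-- UNFILTERED children and pids collected instead of tasks =====
def pvOrder (cm : PySem.Dict Int (List Int)) : Nat → List Int → PySem.Set Int → List Int
  | _, [], _ => []
  | n, pid :: q, v =>
    if PySem.Set.contains v pid then pvOrder cm n q v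
    else match n with
      | 0 => []
      | m + 1 => pid :: pvOrder cm m (q ++ pvKids cm pid) (PySem.Set.add v pid)
  termination_by n q _ => (n, q.length)

lemma pvOrder_nil (cm) (n : Nat) (v : PySem.Set Int) : pvOrder cm n [] v = [] := by
  rw [pvOrder.eq_def]

lemma pvOrder_skip (cm) (n : Nat) (pid : Int) (q) (v : PySem.Set Int)
    (hx : PySem.Set.contains v pid = true) :
    pvOrder cm n (pid :: q) v = pvOrder cm n q v := by
  rw [pvOrder.eq_def]; simp only []; rw [if_pos hx]

lemma pvOrder_zero' (cm) (pid : Int) (q) (v : PySem.Set Int)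
    (hx : ¬ PySem.Set.contains v pid = true) :
    pvOrder cm 0 (pid :: q) v = [] := by
  rw [pvOrder.eq_def]; simp only []; rw [if_neg hx]

lemma pvOrder_step (cm) (m : Nat) (pid : Int) (q) (v : PySem.Set Int)
    (hx : ¬ PySem.Set.contains v pid = true) :
    pvOrder cm (m + 1) (pid :: q) v
      = pid :: pvOrder cm m (q ++ pvKids cm pid) (PySem.Set.add v pid) := by
  rw [pvOrder.eq_def]; simp only []; rw [if_neg hx]

-- q2 is q1 with extra already-visited elements interleaved
inductive pvSkipRel (v : PySem.Set Int) : List Int → List Int → Prop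
  | nil : pvSkipRel v [] []
  | cons (x : Int) {q1 q2 : List Int} : pvSkipRel v q1 q2 → pvSkipRel v (x :: q1) (x :: q2)
  | extra (x : Int) {q1 q2 : List Int} : PySem.Set.contains v x = true → pvSkipRel v q1 q2 →
      pvSkipRel v q1 (x :: q2)

lemma pvSkipRel_refl (v : PySem.Set Int) : ∀ q, pvSkipRel v q q := by
  intro q
  induction q with
  | nil => exact pvSkipRel.nil
  | cons x q ih => exact pvSkipRel.cons x ih

lemma pvSkipRel_append {v : PySem.Set Int} {a b c d : List Int}
    (h1 : pvSkipRel v a b) (h2 : pvSkipRel v c d) : pvSkipRel v (a ++ c) (b ++ d) := by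
  induction h1 with
  | nil => simpa using h2
  | cons x _ ih => exact pvSkipRel.cons x ih
  | extra x hx _ ih => exact pvSkipRel.extra x hx ih

lemma pvSkipRel_filter (v : PySem.Set Int) (l : List Int) :
    pvSkipRel v (l.filter (fun c => !PySem.Set.contains v c)) l := by
  induction l with
  | nil => exact pvSkipRel.nil
  | cons x l ih =>
    rw [List.filter_cons]
    cases hx : PySem.Set.contains v x with
    | true =>
      rw [if_neg (by first | (rw [hx]; decide) | decide)]
      exact pvSkipRel.extra x hx ih
    | false =>
      rw [if_pos (by first | (rw [hx]; decide) | decide)]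
      exact pvSkipRel.cons x ih

lemma pvSkipRel_mono {v v' : PySem.Set Int} {q1 q2 : List Int}
    (hsub : ∀ x, PySem.Set.contains v x = true → PySem.Set.contains v' x = true)
    (h : pvSkipRel v q1 q2) : pvSkipRel v' q1 q2 := by
  induction h with
  | nil => exact pvSkipRel.nil
  | cons x _ ih => exact pvSkipRel.cons x ih
  | extra x hx _ ih => exact pvSkipRel.extra x (hsub x hx) ih

-- skeleton lemma: A's loop = tasks accumulated over the reference pid order
lemma pvSkel (tb : PySem.Dict Int Int) (cm : PySem.Dict Int (List Int)) :
    ∀ n q1 q2 (v : PySem.Set Int) (r : List Int), pvSkipRel v q1 q2 →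
      pvALoop tb cm n q1 v r = pvBTasks tb (pvOrder cm n q2 v) r := by
  intro n
  induction n using Nat.strong_induction_on with
  | _ n ihn =>
    intro q1 q2 v r hrel
    induction hrel generalizing r with
    | nil => rw [pvALoop_nil, pvOrder_nil, pvBTasks_nil]
    | @cons x q1' q2' hrel' ih =>
      cases hx : PySem.Set.contains v x with
      | true =>
        rw [pvALoop_skip tb cm n x q1' v r hx, pvOrder_skip cm n x q2' v hx]
        exact ih r
      | false =>
        match n with
        | 0 =>
          rw [pvALoop_zero tb cm x q1' v r (by first | (rw [hx]; decide) | decide),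
            pvOrder_zero' cm x q2' v (by first | (rw [hx]; decide) | decide), pvBTasks_nil]
        | m + 1 =>
          rw [pvALoop_step tb cm m x q1' v r (by first | (rw [hx]; decide) | decide),
            pvOrder_step cm m x q2' v (by first | (rw [hx]; decide) | decide), pvBTasks_cons]
          exact ihn m (by omega) _ _ _ _
            (pvSkipRel_append
              (pvSkipRel_mono (fun y hy => pvContainsAddOf v x y hy) hrel')
              (pvSkipRel_filter _ _))
    | @extra x q1' q2' hx hrel' ih =>
      rw [pvOrder_skip cm n x q2' v hx]
      exact ih r

lemma pvOrder_zero (cm : PySem.Dict Int (List Int)) :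
    ∀ q (v : PySem.Set Int), pvOrder cm 0 q v = [] := by
  intro q
  induction q with
  | nil => intro v; rw [pvOrder_nil]
  | cons x q ih =>
    intro v
    cases hx : PySem.Set.contains v x with
    | true => rw [pvOrder_skip cm 0 x q v hx]; exact ih v
    | false => exact pvOrder_zero' cm x q v (by first | (rw [hx]; decide) | decide)

-- level step: with exactly |newly| extra fuel, pvOrder consumes one whole layer
lemma pvOrder_level (cm : PySem.Dict Int (List Int)) :
    ∀ (level pending : List Int) (v : PySem.Set Int) (m : Nat),
      pvOrder cm ((pvBNewly level v).1.length + m) (level ++ pending) v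
        = (pvBNewly level v).1
          ++ pvOrder cm m (pending ++ (pvBNewly level v).1.flatMap (pvKids cm))
              (pvBNewly level v).2 := by
  intro level
  induction level with
  | nil => intro pending v m; simp [pvBNewly_nil]
  | cons p rest ih =>
    intro pending v m
    cases hp : PySem.Set.contains v p with
    | true =>
      rw [pvBNewly_skip p rest v hp]
      rw [show ((p :: rest) ++ pending) = p :: (rest ++ pending) from rfl]
      rw [pvOrder_skip cm _ p (rest ++ pending) v hp]
      exact ih pending v m
    | false =>
      rw [pvBNewly_step p rest v (by (try simp only [hp]); decide)]
      have hstep : pvOrder cm ((p :: (pvBNewly rest (PySem.Set.add v p)).1).length + m)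
            ((p :: rest) ++ pending) v
          = p :: pvOrder cm ((pvBNewly rest (PySem.Set.add v p)).1.length + m)
              ((rest ++ pending) ++ pvKids cm p) (PySem.Set.add v p) := by
        rw [show (p :: (pvBNewly rest (PySem.Set.add v p)).1).length + m
            = ((pvBNewly rest (PySem.Set.add v p)).1.length + m) + 1 by
            simp [List.length_cons]; omega]
        rw [show ((p :: rest) ++ pending) = p :: (rest ++ pending) from rfl]
        exact pvOrder_step cm _ p (rest ++ pending) v (by (try simp only [hp]); decide)
      rw [hstep, show (rest ++ pending) ++ pvKids cm p = rest ++ (pending ++ pvKids cm p) by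
          rw [List.append_assoc]]
      rw [ih (pending ++ pvKids cm p) (PySem.Set.add v p) m]
      simp [List.flatMap_cons, List.append_assoc]

-- prefix property: fuel only truncates the pid order
lemma pvOrder_prefix (cm : PySem.Dict Int (List Int)) :
    ∀ (m : Nat), ∀ (q : List Int), ∀ (v : PySem.Set Int) (n : Nat), n ≤ m →
      pvOrder cm n q v = (pvOrder cm m q v).take n := by
  intro m
  induction m using Nat.strong_induction_on with
  | _ m ihm =>
    intro q
    induction q with
    | nil => intro v n hn; rw [pvOrder_nil, pvOrder_nil]; simp
    | cons x q' ih =>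
      intro v n hn
      cases hx : PySem.Set.contains v x with
      | true =>
        rw [pvOrder_skip cm n x q' v hx, pvOrder_skip cm m x q' v hx]
        exact ih v n hn
      | false =>
        match m, hn with
        | 0, hn =>
          have : n = 0 := by omega
          subst this
          rw [pvOrder_zero' cm x q' v (by first | (rw [hx]; decide) | decide)]
          simp
        | m' + 1, hn =>
          rw [pvOrder_step cm m' x q' v (by first | (rw [hx]; decide) | decide)]
          match n with
          | 0 => rw [pvOrder_zero cm]; simp
          | n' + 1 =>
            rw [pvOrder_step cm n' x q' v (by first | (rw [hx]; decide) | decide)]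
            rw [List.take_succ_cons]
            exact congrArg (x :: ·) (ihm m' (by omega) _ _ n' (by omega))

-- potential: queue length + total children-list length over not-yet-visited keys
def pvSigma (cmL : List (Int × List Int)) (v : PySem.Set Int) : Nat :=
  ((cmL.filter (fun e => !PySem.Set.contains v e.1)).map (fun e => e.2.length)).sum

lemma pvSigma_mono (cmL : List (Int × List Int)) (v : PySem.Set Int) (p : Int) :
    pvSigma cmL (PySem.Set.add v p) ≤ pvSigma cmL v := by
  induction cmL with
  | nil => simp [pvSigma]
  | cons e rest ih =>
    simp only [pvSigma, List.filter_cons] at ih ⊢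
    cases he : PySem.Set.contains v e.1 with
    | true =>
      rw [if_neg (by rw [pvContainsAddOf v p e.1 he]; decide), if_neg (by first | (rw [he]; decide) | decide)]
      exact ih
    | false =>
      cases hea : PySem.Set.contains (PySem.Set.add v p) e.1 with
      | true =>
        rw [if_neg (by first | (rw [hea]; decide) | decide), if_pos (by first | (rw [he]; decide) | decide)]
        simp only [List.map_cons, List.sum_cons]
        omega
      | false =>
        rw [if_pos (by first | (rw [hea]; decide) | decide), if_pos (by first | (rw [he]; decide) | decide)]
        simp only [List.map_cons, List.sum_cons]
        omega

lemma pvSigma_drop (cmL : List (Int × List Int)) (v : PySem.Set Int) (p : Int)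
    (hp : ¬ PySem.Set.contains v p = true) :
    ((PySem.Dict.mk cmL).getD p []).length + pvSigma cmL (PySem.Set.add v p)
      ≤ pvSigma cmL v := by
  induction cmL with
  | nil =>
    rw [show ((PySem.Dict.mk ([] : List (Int × List Int))).getD p []) = [] from rfl]
    simp [pvSigma]
  | cons e rest ih =>
    obtain ⟨k, l⟩ := e
    have hget : (PySem.Dict.mk ((k, l) :: rest)).getD p []
        = if (k == p) then l else (PySem.Dict.mk rest).getD p [] := by
      have h1 : (PySem.Dict.mk ((k, l) :: rest)).getD p []
          = ((PySem.Dict.mk ((k, l) :: rest)).get? p).getD [] := rfl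
      rw [h1, PySem.Dict.get?_mk_cons]
      split
      · rfl
      · rfl
    by_cases hk : k = p
    · subst hk
      rw [hget, if_pos (by simp)]
      simp only [pvSigma, List.filter_cons]
      rw [if_neg (by rw [pvContainsAddSelf v k]; decide), if_pos (by (try simp only [hp]); decide)]
      simp only [List.map_cons, List.sum_cons]
      have := pvSigma_mono rest v k
      simp only [pvSigma] at this
      omega
    · rw [hget, if_neg (by simp [hk])]
      simp only [pvSigma, List.filter_cons]
      have hck : PySem.Set.contains (PySem.Set.add v p) k = PySem.Set.contains v k :=
        pvContainsAddNe v p k hk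
      cases hkv : PySem.Set.contains v k with
      | true =>
        rw [if_neg (by rw [hck, hkv]; decide), if_neg (by first | (rw [hkv]; decide) | decide)]
        simp only [pvSigma] at ih
        exact ih
      | false =>
        rw [if_pos (by rw [hck, hkv]; decide), if_pos (by first | (rw [hkv]; decide) | decide)]
        simp only [List.map_cons, List.sum_cons]
        simp only [pvSigma] at ih
        omega

-- length bound: pvOrder never lists more than |queue| + (total children length) pids
lemma pvOrder_len_le (cmL : List (Int × List Int)) :
    ∀ (n : Nat), ∀ (q : List Int), ∀ (v : PySem.Set Int),
      (pvOrder (PySem.Dict.mk cmL) n q v).length ≤ q.length + pvSigma cmL v := by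
  intro n
  induction n using Nat.strong_induction_on with
  | _ n ihn =>
    intro q
    induction q with
    | nil => intro v; rw [pvOrder_nil]; simp
    | cons x q' ih =>
      intro v
      cases hx : PySem.Set.contains v x with
      | true =>
        rw [pvOrder_skip _ n x q' v hx]
        have := ih v
        simp only [List.length_cons]
        omega
      | false =>
        match n with
        | 0 => rw [pvOrder_zero' _ x q' v (by first | (rw [hx]; decide) | decide)]; simp
        | m + 1 =>
          rw [pvOrder_step _ m x q' v (by first | (rw [hx]; decide) | decide)]
          have hih := ihn m (by omega) (q' ++ pvKids (PySem.Dict.mk cmL) x)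
            (PySem.Set.add v x)
          have hkids : (pvKids (PySem.Dict.mk cmL) x).length
              = ((PySem.Dict.mk cmL).getD x []).length :=
            PySem.List.length_sorted _ _ _
          have hdrop := pvSigma_drop cmL v x (by first | (rw [hx]; decide) | decide)
          simp only [List.length_cons, List.length_append] at hih ⊢
          omega

-- completeness: when pvOrder's fuel does not run out, B's layers compute the same order
lemma pvLayers_eq_pvOrder (cm : PySem.Dict Int (List Int)) :
    ∀ (nA : Nat), ∀ (level : List Int) (v : PySem.Set Int) (nB : Nat),
      (pvOrder cm nA level v).length < nA → nA ≤ nB →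
      pvBLayers cm nB level v = pvOrder cm nA level v := by
  intro nA
  induction nA using Nat.strong_induction_on with
  | _ nA ihnA =>
    intro level v nB hlt hle
    match level with
    | [] => rw [pvBLayers_nil, pvOrder_nil]
    | p :: rest =>
      have hnew_le : (pvBNewly (p :: rest) v).1.length ≤ nA := by
        by_contra hgt
        rw [not_le] at hgt
        have h1 : pvOrder cm nA (p :: rest) v
            = (pvOrder cm ((pvBNewly (p :: rest) v).1.length + nA) (p :: rest) v).take nA :=
          pvOrder_prefix cm ((pvBNewly (p :: rest) v).1.length + nA) (p :: rest) v nA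
            (by omega)
        have h2 := pvOrder_level cm (p :: rest) [] v nA
        rw [List.append_nil] at h2
        rw [h2, List.take_append_of_le_length (by omega)] at h1
        have hlen : (pvOrder cm nA (p :: rest) v).length = nA := by
          rw [h1, List.length_take]
          omega
        omega
      obtain ⟨m, hm⟩ : ∃ m, nA = (pvBNewly (p :: rest) v).1.length + m :=
        ⟨nA - (pvBNewly (p :: rest) v).1.length, by omega⟩
      have hLS := pvOrder_level cm (p :: rest) [] v m
      rw [List.append_nil, List.nil_append, ← hm] at hLS
      match nB, hle with
      | 0, hle => omega
      | nB' + 1, hle =>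
        rw [pvBLayers_step cm nB' p rest v, hLS]
        congr 1
        rcases List.eq_nil_or_concat' ((pvBNewly (p :: rest) v).1) with hnil | _
        · rw [hnil]
          simp only [List.flatMap_nil]
          rw [pvBLayers_nil, pvOrder_nil]
        · have hpos : 0 < (pvBNewly (p :: rest) v).1.length := by
            rcases h : (pvBNewly (p :: rest) v).1 with _ | _
            · simp_all
            · simp
          have hrec_lt :
              (pvOrder cm m ((pvBNewly (p :: rest) v).1.flatMap (pvKids cm))
                (pvBNewly (p :: rest) v).2).length < m := by
            rw [hLS] at hlt
            simp only [List.length_append] at hlt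
            omega
          exact ihnA m (by omega) _ _ nB' hrec_lt (by omega)

-- ===== VERDICT (by name: the statement is the Claim_ definition above) =====
theorem collect_descendants_py_spec : Claim_equal_collect_descendants_py := by
  intro root tb cm _
  unfold Spec_collect_descendants_py collect_descendants_py collect_descendants_py_alt
  rw [pvSkel (PySem.Dict.mk tb) (PySem.Dict.mk cm)
    (2 + (cm.map (fun p => p.2.length)).sum) [root] [root] PySem.Set.empty []
    (pvSkipRel_refl _ _)]
  congr 1
  have hlen := pvOrder_len_le cm (2 + (cm.map (fun p => p.2.length)).sum) [root]
    PySem.Set.empty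
  have hsig : pvSigma cm PySem.Set.empty = (cm.map (fun p => p.2.length)).sum := by
    simp [pvSigma, PySem.Set.contains, PySem.Set.empty]
  rw [hsig] at hlen
  exact (pvLayers_eq_pvOrder (PySem.Dict.mk cm) (2 + (cm.map (fun p => p.2.length)).sum)
    [root] PySem.Set.empty (2 + (cm.map (fun p => p.2.length)).sum)
    (by simp only [List.length_singleton] at hlen; omega) (le_refl _)).symm
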